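-- pv_equiv track=rewrite | github.com/Zhenye-Na/leetcode | python/1615.maximal-network-rank.py | findNumsOfRoad
-- ===== SOURCE A (Python) =====
-- def findNumsOfRoad(point_a, point_b, roads):
--     num_of_roads = 0
--
--     for road in roads:
--         if (road[0] == point_a and road[1] == point_b) or (road[1] == point_a and road[0] == point_b):
--             num_of_roads += 1
--             continue
--
--         if road[0] == point_a or road[1] == point_a:
--             num_of_roads += 1
--
--         if road[0] == point_b or road[1] == point_b:
--             num_of_roads += 1
--
--     return num_of_roads
-- ===== SOURCE B (Python) =====
-- def findNumsOfRoad(point_a, point_b, roads):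
--     deg_a = sum(1 for r in roads if r[0] == point_a or r[1] == point_a)
--     deg_b = sum(1 for r in roads if r[0] == point_b or r[1] == point_b)
--     shared = sum(1 for r in roads
--                  if (r[0] == point_a and r[1] == point_b)
--                  or (r[1] == point_a and r[0] == point_b))
--     return deg_a + deg_b - shared
-- ===== Notes on version B (the rewrite author's own statement) =====
-- stated objective: simpler
-- what changed: Replaces A's single loop with mutually-exclusive case analysis and continue by three independent incidence counts combined by inclusion-exclusion (deg_a + deg_b - shared).
import Mathlib
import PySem

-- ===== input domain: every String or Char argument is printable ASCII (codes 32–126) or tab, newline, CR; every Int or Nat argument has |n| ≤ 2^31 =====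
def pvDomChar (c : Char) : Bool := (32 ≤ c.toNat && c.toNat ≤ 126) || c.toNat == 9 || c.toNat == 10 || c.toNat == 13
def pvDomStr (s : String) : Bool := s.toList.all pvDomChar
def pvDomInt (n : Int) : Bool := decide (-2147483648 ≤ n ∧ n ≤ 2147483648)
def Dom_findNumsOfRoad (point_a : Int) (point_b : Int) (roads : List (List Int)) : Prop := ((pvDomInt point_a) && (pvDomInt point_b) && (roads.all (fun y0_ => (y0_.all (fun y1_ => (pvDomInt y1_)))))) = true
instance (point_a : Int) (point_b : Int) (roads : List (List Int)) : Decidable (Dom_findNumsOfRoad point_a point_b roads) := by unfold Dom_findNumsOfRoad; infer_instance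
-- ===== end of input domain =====

-- B replaces A's mutually-exclusive case analysis (with continue) by three independent
-- incidence counts combined by inclusion-exclusion; objective: simpler.

-- ===== PORT A =====
def findNumsOfRoad (point_a : Int) (point_b : Int) (roads : List (List Int)) : Int :=
  roads.foldl (fun num_of_roads road =>
    if (PySem.List.pyGetD road 0 0 == point_a && PySem.List.pyGetD road 1 0 == point_b) ||
       (PySem.List.pyGetD road 1 0 == point_a && PySem.List.pyGetD road 0 0 == point_b) then
      num_of_roads + 1
    else
      let num_of_roads :=
        if PySem.List.pyGetD road 0 0 == point_a || PySem.List.pyGetD road 1 0 == point_a then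
          num_of_roads + 1
        else num_of_roads
      if PySem.List.pyGetD road 0 0 == point_b || PySem.List.pyGetD road 1 0 == point_b then
        num_of_roads + 1
      else num_of_roads) 0

-- ===== PORT B =====
def findNumsOfRoad_alt (point_a : Int) (point_b : Int) (roads : List (List Int)) : Int :=
  let deg_a : Int :=
    (roads.countP (fun r => PySem.List.pyGetD r 0 0 == point_a || PySem.List.pyGetD r 1 0 == point_a) : Nat)
  let deg_b : Int :=
    (roads.countP (fun r => PySem.List.pyGetD r 0 0 == point_b || PySem.List.pyGetD r 1 0 == point_b) : Nat)
  let shared : Int :=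
    (roads.countP (fun r =>
      (PySem.List.pyGetD r 0 0 == point_a && PySem.List.pyGetD r 1 0 == point_b) ||
      (PySem.List.pyGetD r 1 0 == point_a && PySem.List.pyGetD r 0 0 == point_b)) : Nat)
  deg_a + deg_b - shared

-- ===== PRECONDITION & SPEC =====
-- Pre_ excludes roads entries with fewer than 2 elements, on which Python A (road[0]/road[1]) raises IndexError.
def Pre_findNumsOfRoad (point_a : Int) (point_b : Int) (roads : List (List Int)) : Prop :=
  ∀ r ∈ roads, 2 ≤ r.length
instance (point_a : Int) (point_b : Int) (roads : List (List Int)) : Decidable (Pre_findNumsOfRoad point_a point_b roads) := by unfold Pre_findNumsOfRoad; infer_instance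
def pvWitness_findNumsOfRoad : Int × Int × List (List Int) := (1, 2, [[1, 2], [2, 3], [1, 3]])

def Spec_findNumsOfRoad (point_a : Int) (point_b : Int) (roads : List (List Int)) (out : Int) : Prop := out = findNumsOfRoad_alt point_a point_b roads
instance (point_a : Int) (point_b : Int) (roads : List (List Int)) (out : Int) : Decidable (Spec_findNumsOfRoad point_a point_b roads out) := by unfold Spec_findNumsOfRoad; infer_instance

-- ===== CLAIM (what is proved, stated in full; the proofs are below) =====
def Claim_equal_findNumsOfRoad : Prop := ∀ (point_a : Int) (point_b : Int) (roads : List (List Int)), Dom_findNumsOfRoad point_a point_b roads → Pre_findNumsOfRoad point_a point_b roads → Spec_findNumsOfRoad point_a point_b roads (findNumsOfRoad point_a point_b roads)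

-- ===== LEMMAS AND PROOFS =====

-- A's loop, from an arbitrary accumulator, computes the accumulator plus B's inclusion-exclusion value.
theorem findNumsOfRoad_foldl (point_a point_b : Int) (roads : List (List Int)) (acc : Int) :
    roads.foldl (fun num_of_roads road =>
      if (PySem.List.pyGetD road 0 0 == point_a && PySem.List.pyGetD road 1 0 == point_b) ||
         (PySem.List.pyGetD road 1 0 == point_a && PySem.List.pyGetD road 0 0 == point_b) then
        num_of_roads + 1
      else
        let num_of_roads :=
          if PySem.List.pyGetD road 0 0 == point_a || PySem.List.pyGetD road 1 0 == point_a then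
            num_of_roads + 1
          else num_of_roads
        if PySem.List.pyGetD road 0 0 == point_b || PySem.List.pyGetD road 1 0 == point_b then
          num_of_roads + 1
        else num_of_roads) acc
    = acc + findNumsOfRoad_alt point_a point_b roads := by
  induction roads generalizing acc with
  | nil => simp [findNumsOfRoad_alt]
  | cons r rest ih =>
      rw [List.foldl_cons, ih]
      simp only [findNumsOfRoad_alt, List.countP_cons]
      by_cases h1 : PySem.List.pyGetD r 0 0 = point_a <;>
        by_cases h2 : PySem.List.pyGetD r 1 0 = point_a <;>
        by_cases h3 : PySem.List.pyGetD r 0 0 = point_b <;>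
        by_cases h4 : PySem.List.pyGetD r 1 0 = point_b <;>
        simp [h1, h2, h3, h4] <;> omega

-- ===== VERDICT (by name: the statement is the Claim_ definition above) =====
theorem findNumsOfRoad_spec : Claim_equal_findNumsOfRoad := by
  intro point_a point_b roads _ _
  unfold Spec_findNumsOfRoad findNumsOfRoad
  rw [findNumsOfRoad_foldl]
  ring
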